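-- pv_equiv track=rewrite | github.com/VettSKRT/1202220295_AUVETA_ASSESMENT-ESD-2023 | Soal Assesmen/soal5.py | hitung_kombinasi_username
-- ===== SOURCE A (Python) =====
-- from itertools import permutations
--
-- def hitung_kombinasi_username(nama_lengkap):
--     nama_lengkap = nama_lengkap.replace(" ", "").lower()
--
--     semua_kombinasi = []
--     for i in range(1, 7):
--         kombinasi = permutations(nama_lengkap, i)
--         semua_kombinasi.extend(kombinasi)
--
--     # Menghitung jumlah kombinasi yang mungkin
--     jumlah_kombinasi = len(set(map(lambda x: ''.join(x), semua_kombinasi)))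
--
--     return jumlah_kombinasi
-- ===== SOURCE B (Python) =====
-- def hitung_kombinasi_username(nama_lengkap):
--     # Multiset-arrangement counting: for each length k (1..6) the number of
--     # distinct arrangements is obtained by a binomial-convolution DP over the
--     # letter multiplicities, so no permutation is ever materialised.
--     s = nama_lengkap.replace(" ", "").lower()
--     counts = {}
--     for ch in s:
--         counts[ch] = counts.get(ch, 0) + 1
--
--     def comb(n, k):
--         if k == 0:
--             return 1
--         if n == 0:
--             return 0
--         return comb(n - 1, k - 1) + comb(n - 1, k)
--
--     g = [1, 0, 0, 0, 0, 0, 0]   # g[k] = arrangements of length k seen so far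
--     for c in counts.values():
--         g = [sum(comb(k, j) * g[k - j] for j in range(min(c, k) + 1))
--              for k in range(7)]
--     return sum(g[1:7])
-- ===== Notes on version B (the rewrite author's own statement) =====
-- stated objective: faster
-- what changed: Replaces enumerating all length-1..6 index-permutations and deduplicating them in a set by a multiset-arrangement count: a letter-frequency counter plus a binomial-convolution DP (k!-scaled EGF product) gives the number of distinct arrangements per length directly.
import Mathlib
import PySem

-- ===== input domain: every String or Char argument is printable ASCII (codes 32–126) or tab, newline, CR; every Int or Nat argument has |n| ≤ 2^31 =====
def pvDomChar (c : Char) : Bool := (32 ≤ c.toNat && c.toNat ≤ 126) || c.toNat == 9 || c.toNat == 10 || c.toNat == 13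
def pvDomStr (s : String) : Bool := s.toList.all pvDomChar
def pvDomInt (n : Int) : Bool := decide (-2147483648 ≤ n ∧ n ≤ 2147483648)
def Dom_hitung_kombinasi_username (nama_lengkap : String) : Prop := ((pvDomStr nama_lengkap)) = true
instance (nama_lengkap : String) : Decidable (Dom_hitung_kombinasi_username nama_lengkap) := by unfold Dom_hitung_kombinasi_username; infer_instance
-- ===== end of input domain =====

-- B replaces A's enumeration of all length-1..6 index-permutations (deduplicated in a set)
-- by a letter-frequency counter and a binomial-convolution DP that counts the distinct
-- arrangements per length directly (objective: faster).

-- ===== PORT A =====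
-- literal port of A: strip spaces, lowercase, extend a list with the permutations of
-- each length 1..6, then take the size of the set of joined strings
-- (Python's set is a hash set; it is ported as Std.HashSet built by inserting each
--  joined string, and len(...) as its .size — the number of distinct elements)
def hitung_kombinasi_username (nama_lengkap : String) : Int :=
  let cs := PySem.Chars.lower (PySem.Chars.replace nama_lengkap.toList [' '] [])
  let semua := (PySem.List.pyRange 1 7 1).foldl
      (fun acc i => acc ++ PySem.List.permutations cs i.toNat) ([] : List (List Char))
  (((semua.map (fun x => String.ofList x)).foldl
      (fun t x => t.insert x) (∅ : Std.HashSet String)).size : Int)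

-- ===== PORT B =====
-- Source B's recursive comb(n, k) (Pascal recursion, exact)
def pyComb : Nat → Nat → Int
  | _, 0 => 1
  | 0, _+1 => 0
  | n+1, k+1 => pyComb n k + pyComb n (k+1)

-- literal port of B: counter dict, then for each count c the binomial-convolution
-- update of the 7-entry table g, finally sum(g[1:7]).
-- (loop indices k, j of range(7)/range(min(c,k)+1) are the Nat values of the
--  nonnegative Python ints; g[k-j] is always in range, ported as List.getD)
def hitung_kombinasi_username_alt (nama_lengkap : String) : Int :=
  let cs := PySem.Chars.lower (PySem.Chars.replace nama_lengkap.toList [' '] [])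
  let counts := cs.foldl (fun d ch => d.insert ch (d.getD ch 0 + 1))
      (PySem.Dict.empty : PySem.Dict Char Int)
  let g0 : List Int := [1, 0, 0, 0, 0, 0, 0]
  let g := counts.values.foldl
      (fun g c => (List.range 7).map (fun (k : Nat) =>
        ((List.range (min c ((k : Nat) : Int) + 1).toNat).map
            (fun (j : Nat) => pyComb k j * g.getD (k - j) 0)).sum)) g0
  (PySem.List.slice g (some 1) (some 7)).sum

-- ===== PRECONDITION & SPEC =====
def Spec_hitung_kombinasi_username (nama_lengkap : String) (out : Int) : Prop := out = hitung_kombinasi_username_alt nama_lengkap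
instance (nama_lengkap : String) (out : Int) : Decidable (Spec_hitung_kombinasi_username nama_lengkap out) := by unfold Spec_hitung_kombinasi_username; infer_instance

-- ===== CLAIM (what is proved, stated in full; the proofs are below) =====
def Claim_equal_hitung_kombinasi_username : Prop := ∀ (nama_lengkap : String), Dom_hitung_kombinasi_username nama_lengkap → Spec_hitung_kombinasi_username nama_lengkap (hitung_kombinasi_username nama_lengkap)

-- ===== LEMMAS AND PROOFS =====

theorem pyComb_eq (n k : Nat) : pyComb n k = (n.choose k : Int) := by
  induction n generalizing k with
  | zero => cases k <;> simp [pyComb]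
  | succ n ih =>
    cases k with
    | zero => simp [pyComb]
    | succ k =>
      show pyComb n k + pyComb n (k+1) = _
      rw [ih, ih, Nat.choose_succ_succ]
      push_cast
      ring

-- decrement a multiplicity function at one letter
def pvDecr (c : Char → Nat) (a : Char) : Char → Nat := fun x => if x = a then c x - 1 else c x

-- all distinct arrangements of length k drawing letters from ds, at most c a copies of a
def pvArr (ds : List Char) : Nat → (Char → Nat) → List (List Char)
  | 0, _ => [[]]
  | k+1, c => ds.flatMap fun a =>
      if 0 < c a then (pvArr ds k (pvDecr c a)).map (a :: ·) else []

def pvN (ds : List Char) (k : Nat) (c : Char → Nat) : Nat := (pvArr ds k c).length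

theorem pvArr_zero (ds : List Char) (c : Char → Nat) : pvArr ds 0 c = [[]] := rfl

theorem pvArr_succ (ds : List Char) (k : Nat) (c : Char → Nat) :
    pvArr ds (k+1) c = ds.flatMap (fun a =>
      if 0 < c a then (pvArr ds k (pvDecr c a)).map (a :: ·) else []) := rfl

theorem mem_pvArr (ds : List Char) (k : Nat) (c : Char → Nat) (l : List Char) :
    l ∈ pvArr ds k c ↔ l.length = k ∧ (∀ a ∈ l, a ∈ ds) ∧ ∀ a, l.count a ≤ c a := by
  induction k generalizing c l with
  | zero =>
    rw [pvArr_zero]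
    constructor
    · intro h
      simp at h
      subst h
      simp
    · rintro ⟨hlen, -, -⟩
      simp [List.length_eq_zero_iff.mp hlen]
  | succ k ih =>
    rw [pvArr_succ, List.mem_flatMap]
    constructor
    · rintro ⟨a, ha, hl⟩
      by_cases hca : 0 < c a
      · rw [if_pos hca, List.mem_map] at hl
        obtain ⟨t, ht, rfl⟩ := hl
        obtain ⟨hlen, hmem, hcount⟩ := (ih _ _).mp ht
        refine ⟨by simp [hlen], ?_, ?_⟩
        · intro x hx
          rcases List.mem_cons.mp hx with rfl | hx
          · exact ha
          · exact hmem x hx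
        · intro x
          have hc := hcount x
          by_cases hxa : x = a
          · subst hxa
            simp [pvDecr] at hc
            simp
            omega
          · simp [pvDecr, hxa] at hc
            simp [Ne.symm hxa]
            omega
      · rw [if_neg hca] at hl
        simp at hl
    · rintro ⟨hlen, hmem, hcount⟩
      cases l with
      | nil => simp at hlen
      | cons a t =>
        have hca : 0 < c a := by
          have := hcount a
          simp at this
          omega
        refine ⟨a, hmem a (by simp), ?_⟩
        rw [if_pos hca, List.mem_map]
        refine ⟨t, (ih _ _).mpr ⟨by simpa using hlen, fun x hx => hmem x (by simp [hx]), ?_⟩, rfl⟩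
        intro x
        have hc := hcount x
        by_cases hxa : x = a
        · subst hxa
          simp at hc
          simp [pvDecr]
          omega
        · simp [Ne.symm hxa] at hc
          simp [pvDecr, hxa]
          omega

theorem nodup_pvArr (ds : List Char) (k : Nat) (c : Char → Nat) (h : ds.Nodup) :
    (pvArr ds k c).Nodup := by
  induction k generalizing c with
  | zero => simp [pvArr_zero]
  | succ k ih =>
    rw [pvArr_succ, List.nodup_flatMap]
    constructor
    · intro a _
      by_cases hca : 0 < c a
      · rw [if_pos hca]
        exact List.Nodup.map (fun x y hxy => by simpa using hxy) (ih _)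
      · rw [if_neg hca]
        exact List.nodup_nil
    · refine h.imp ?_
      intro a b hab l hla' hlb'
      have hla : l ∈ (if 0 < c a then (pvArr ds k (pvDecr c a)).map (a :: ·) else []) := hla'
      have hlb : l ∈ (if 0 < c b then (pvArr ds k (pvDecr c b)).map (b :: ·) else []) := hlb'
      by_cases hca : 0 < c a
      · by_cases hcb : 0 < c b
        · rw [if_pos hca, List.mem_map] at hla
          rw [if_pos hcb, List.mem_map] at hlb
          obtain ⟨t, -, rfl⟩ := hla
          obtain ⟨t', -, heq⟩ := hlb
          injection heq with h1 _
          exact hab h1.symm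
        · rw [if_neg hcb] at hlb
          simp at hlb
      · rw [if_neg hca] at hla
        simp at hla

theorem pvArr_congr (ds : List Char) (k : Nat) (c c' : Char → Nat)
    (h : ∀ a ∈ ds, c a = c' a) : pvArr ds k c = pvArr ds k c' := by
  induction k generalizing c c' with
  | zero => simp [pvArr_zero]
  | succ k ih =>
    rw [pvArr_succ, pvArr_succ, List.flatMap_def, List.flatMap_def]
    congr 1
    apply List.map_congr_left
    intro a ha
    rw [h a ha]
    by_cases hca : 0 < c' a
    · rw [if_pos hca, if_pos hca]
      congr 1
      apply ih
      intro x hx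
      simp only [pvDecr]
      rw [h x hx]
    · rw [if_neg hca, if_neg hca]

theorem pvN_succ (ds : List Char) (k : Nat) (c : Char → Nat) :
    pvN ds (k+1) c = (ds.map fun a => if 0 < c a then pvN ds k (pvDecr c a) else 0).sum := by
  unfold pvN
  rw [pvArr_succ, List.length_flatMap]
  congr 1
  apply List.map_congr_left
  intro a _
  by_cases hca : 0 < c a
  · simp [hca]
  · simp [hca]

theorem pvSwapSum (l : List Char) (s : Finset ℕ) (f : Char → ℕ → ℕ) :
    (l.map fun a => ∑ j ∈ s, f a j).sum = ∑ j ∈ s, (l.map fun a => f a j).sum := by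
  induction l with
  | nil => simp
  | cons a t ih => simp [ih, Finset.sum_add_distrib]

theorem pvStep (ds : List Char) (d : Char) (k : Nat) (c : Char → Nat) (hd : d ∉ ds) :
    pvN (ds ++ [d]) k c = ∑ j ∈ Finset.range (min (c d) k + 1), k.choose j * pvN ds (k - j) c := by
  induction k generalizing c with
  | zero => simp [pvN, pvArr_zero]
  | succ k ih =>
    have hcong : ∀ m c₀, pvN ds m (pvDecr c₀ d) = pvN ds m c₀ := by
      intro m c₀
      unfold pvN
      rw [pvArr_congr ds m (pvDecr c₀ d) c₀ (fun a ha => by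
        have had : a ≠ d := fun h => hd (h ▸ ha)
        simp [pvDecr, had])]
    have hstep1 :
        (ds.map fun a => if 0 < c a then pvN (ds ++ [d]) k (pvDecr c a) else 0).sum
          = ∑ j ∈ Finset.range (min (c d) k + 1), k.choose j * pvN ds (k + 1 - j) c := by
      have h1 : ∀ a ∈ ds, (if 0 < c a then pvN (ds ++ [d]) k (pvDecr c a) else 0)
          = ∑ j ∈ Finset.range (min (c d) k + 1),
              k.choose j * (if 0 < c a then pvN ds (k - j) (pvDecr c a) else 0) := by
        intro a ha
        have had : a ≠ d := fun h => hd (h ▸ ha)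
        by_cases hca : 0 < c a
        · rw [if_pos hca, ih (pvDecr c a)]
          have hda : pvDecr c a d = c d := by simp [pvDecr, Ne.symm had]
          rw [hda]
          exact Finset.sum_congr rfl (fun j _ => by rw [if_pos hca])
        · rw [if_neg hca]
          simp [hca]
      rw [List.map_congr_left h1, pvSwapSum]
      apply Finset.sum_congr rfl
      intro j hj
      rw [List.sum_map_mul_left]
      congr 1
      have hj' : k - j + 1 = k + 1 - j := by
        rw [Finset.mem_range] at hj
        omega
      rw [← hj', ← pvN_succ]
    rw [pvN_succ, List.map_append, List.sum_append]
    simp only [List.map_cons, List.map_nil, List.sum_cons, List.sum_nil, add_zero]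
    rw [hstep1]
    by_cases hcd : 0 < c d
    · rw [if_pos hcd, ih (pvDecr c d)]
      have hdd : pvDecr c d d = c d - 1 := by simp [pvDecr]
      rw [hdd]
      have hT2 : ∑ j ∈ Finset.range (min (c d - 1) k + 1), k.choose j * pvN ds (k - j) (pvDecr c d)
          = ∑ j ∈ Finset.range (min (c d - 1) k + 1), k.choose j * pvN ds (k - j) c :=
        Finset.sum_congr rfl (fun j _ => by rw [hcong])
      rw [hT2]
      have hM'' : min (c d) (k + 1) = min (c d - 1) k + 1 := by omega
      rw [hM'']
      rw [Finset.sum_range_succ' (fun j => (k+1).choose j * pvN ds (k + 1 - j) c) (min (c d - 1) k + 1)]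
      have hsplit : ∀ i ∈ Finset.range (min (c d - 1) k + 1),
          (k+1).choose (i+1) * pvN ds (k + 1 - (i+1)) c
            = k.choose i * pvN ds (k - i) c + k.choose (i+1) * pvN ds (k - i) c := by
        intro i _
        rw [Nat.choose_succ_succ]
        have : k + 1 - (i + 1) = k - i := by omega
        rw [this, Nat.add_mul]
      rw [Finset.sum_congr rfl hsplit, Finset.sum_add_distrib]
      have hT1 : ∑ j ∈ Finset.range (min (c d) k + 1), k.choose j * pvN ds (k + 1 - j) c
          = (∑ i ∈ Finset.range (min (c d - 1) k + 1), k.choose (i+1) * pvN ds (k - i) c)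
              + pvN ds (k + 1) c := by
        rw [Finset.sum_range_succ' (fun j => k.choose j * pvN ds (k + 1 - j) c) (min (c d) k)]
        have he : ∀ i ∈ Finset.range (min (c d) k),
            k.choose (i+1) * pvN ds (k + 1 - (i+1)) c = k.choose (i+1) * pvN ds (k - i) c := by
          intro i _
          have : k + 1 - (i + 1) = k - i := by omega
          rw [this]
        rw [Finset.sum_congr rfl he]
        by_cases hck : c d ≤ k
        · have h1 : min (c d - 1) k + 1 = min (c d) k := by omega
          rw [h1]
          simp
        · have h1 : min (c d) k = k := by omega
          have h2 : min (c d - 1) k + 1 = k + 1 := by omega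
          rw [h1, h2, Finset.sum_range_succ (fun i => k.choose (i+1) * pvN ds (k - i) c) k]
          rw [Nat.choose_eq_zero_of_lt (Nat.lt_succ_self k)]
          simp
      rw [hT1]
      simp only [Nat.choose_zero_right, Nat.sub_zero, one_mul]
      omega
    · have hc0 : c d = 0 := by omega
      rw [if_neg hcd]
      simp [hc0]

theorem pvSubperm_cons_erase {l l' : List Char} {a : Char} (h : (a :: l).Subperm l') :
    l.Subperm (l'.erase a) := by
  rw [List.subperm_ext_iff] at h ⊢
  intro x hx
  by_cases hxa : x = a
  · subst hxa
    have h2 := h x (by simp)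
    rw [List.count_cons] at h2
    rw [List.count_erase]
    simp at h2 ⊢
    omega
  · have h2 := h x (by simp [hx])
    rw [List.count_cons] at h2
    rw [List.count_erase]
    simp [Ne.symm hxa] at h2 ⊢
    omega

theorem mem_permutations_iff (xs p : List Char) (r : Nat) :
    p ∈ PySem.List.permutations xs r ↔ p.length = r ∧ p.Subperm xs := by
  induction r generalizing xs p with
  | zero =>
    rw [PySem.List.permutations_zero]
    constructor
    · intro h
      simp at h
      subst h
      exact ⟨rfl, List.nil_subperm⟩
    · rintro ⟨hlen, -⟩
      simp [List.length_eq_zero_iff.mp hlen]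
  | succ r ih =>
    rw [PySem.List.permutations_succ, List.mem_flatMap]
    constructor
    · rintro ⟨i, hi, hp⟩
      rw [List.mem_range] at hi
      rw [List.getElem?_eq_getElem hi] at hp
      simp only [List.mem_map] at hp
      obtain ⟨q, hq, rfl⟩ := hp
      obtain ⟨hlen, hsub⟩ := (ih _ _).mp hq
      have hperm : (xs[i] :: xs.eraseIdx i).Perm xs := List.getElem_cons_eraseIdx_perm hi
      refine ⟨by simp [hlen], ?_⟩
      have hq' : ∀ x, List.count x q ≤ List.count x (xs.eraseIdx i) := by
        intro x
        by_cases hxq : x ∈ q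
        · exact (List.subperm_ext_iff.mp hsub) x hxq
        · simp [List.count_eq_zero_of_not_mem hxq]
      rw [List.subperm_ext_iff]
      intro x hx
      rw [← hperm.count_eq, List.count_cons, List.count_cons]
      have := hq' x
      omega
    · rintro ⟨hlen, hsub⟩
      cases p with
      | nil => simp at hlen
      | cons a q =>
        have ha : a ∈ xs := hsub.subset (by simp)
        have hilt : xs.idxOf a < xs.length := List.idxOf_lt_length_of_mem ha
        refine ⟨xs.idxOf a, by rw [List.mem_range]; exact hilt, ?_⟩
        rw [List.getElem?_eq_getElem hilt, List.getElem_idxOf hilt]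
        simp only [List.mem_map]
        refine ⟨q, (ih _ _).mpr ⟨by simpa using hlen, ?_⟩, rfl⟩
        rw [List.eraseIdx_idxOf_eq_erase]
        exact pvSubperm_cons_erase hsub

theorem pvOfList_inj : Function.Injective String.ofList := by
  intro a b hab
  have ha : (String.ofList a).toList = a := Eq.symm (String.ofList_eq.mp rfl)
  have hb : (String.ofList b).toList = b := Eq.symm (String.ofList_eq.mp rfl)
  rw [← ha, ← hb, hab]

theorem pvHashSize : ∀ (L : List String) (s : Std.HashSet String) (fs : Finset String),
    (∀ x, x ∈ s ↔ x ∈ fs) → s.size = fs.card →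
    (L.foldl (fun t x => t.insert x) s).size = (fs ∪ L.toFinset).card := by
  intro L
  induction L with
  | nil =>
    intro s fs hmem hsz
    simpa using hsz
  | cons x t ih =>
    intro s fs hmem hsz
    rw [List.foldl_cons]
    have hmem' : ∀ y, y ∈ s.insert x ↔ y ∈ insert x fs := by
      intro y
      rw [Std.HashSet.mem_insert, Finset.mem_insert, beq_iff_eq, hmem, eq_comm (a := x)]
    have hsz' : (s.insert x).size = (insert x fs).card := by
      rw [Std.HashSet.size_insert]
      by_cases hx : x ∈ s
      · rw [if_pos hx, Finset.insert_eq_self.mpr ((hmem x).mp hx)]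
        exact hsz
      · rw [if_neg hx, Finset.card_insert_of_notMem (fun hc => hx ((hmem x).mpr hc)), hsz]
    rw [ih (s.insert x) (insert x fs) hmem' hsz', List.toFinset_cons]
    congr 1
    rw [Finset.insert_union, Finset.union_insert]

theorem pvHashCard (L : List String) :
    (L.foldl (fun t x => t.insert x) (∅ : Std.HashSet String)).size = L.toFinset.card := by
  have h := pvHashSize L ∅ ∅ (by intro x; simp) (by simp)
  simpa using h

theorem toFinset_card_append (A B : List String) (h : ∀ x ∈ A, x ∉ B) :
    (A ++ B).toFinset.card = A.toFinset.card + B.toFinset.card := by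
  rw [List.toFinset_append, Finset.card_union_of_disjoint]
  rw [Finset.disjoint_left]
  intro x hx hx'
  rw [List.mem_toFinset] at hx hx'
  exact h x hx hx'

-- A's distinct joined strings of one length
def pvPk (cs : List Char) (k : Nat) : List String :=
  (PySem.List.permutations cs k).map String.ofList

theorem pvPk_len {cs : List Char} {x : String} {k : Nat} (h : x ∈ pvPk cs k) :
    x.toList.length = k := by
  obtain ⟨p, hp, rfl⟩ := List.mem_map.mp h
  have : (String.ofList p).toList = p := Eq.symm (String.ofList_eq.mp rfl)
  rw [this]
  exact PySem.List.length_of_mem_permutations hp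

theorem pvPk_card (cs : List Char) (k : Nat) :
    (pvPk cs k).toFinset.card = pvN (PySem.Set.ofList cs) k (fun a => cs.count a) := by
  unfold pvPk
  have hmap : (List.map String.ofList (PySem.List.permutations cs k)).toFinset
      = (PySem.List.permutations cs k).toFinset.image String.ofList := by
    ext x
    simp
  rw [hmap, Finset.card_image_of_injective _ pvOfList_inj]
  have h1 : (PySem.List.permutations cs k).toFinset
      = (pvArr (PySem.Set.ofList cs) k (fun a => cs.count a)).toFinset := by
    ext p
    rw [List.mem_toFinset, List.mem_toFinset, mem_permutations_iff, mem_pvArr]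
    constructor
    · rintro ⟨hlen, hsub⟩
      rw [List.subperm_ext_iff] at hsub
      refine ⟨hlen, ?_, ?_⟩
      · intro a ha
        rw [PySem.Set.mem_ofList]
        have h2 := hsub a ha
        have h3 : 0 < List.count a cs := lt_of_lt_of_le (List.count_pos_iff.mpr ha) h2
        exact List.count_pos_iff.mp h3
      · intro a
        by_cases ha : a ∈ p
        · exact hsub a ha
        · simp [List.count_eq_zero_of_not_mem ha]
    · rintro ⟨hlen, hmem, hcnt⟩
      exact ⟨hlen, List.subperm_ext_iff.mpr fun x _ => hcnt x⟩
  rw [h1, List.toFinset_card_of_nodup (nodup_pvArr _ _ _ (PySem.Set.nodup_ofList cs))]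
  rfl

theorem pvSumRangeInt (n : Nat) (f : Nat → Int) :
    ((List.range n).map f).sum = ∑ j ∈ Finset.range n, f j := by
  induction n with
  | zero => simp
  | succ n ih =>
    rw [List.range_succ, List.map_append, List.sum_append, Finset.sum_range_succ, ih]
    simp

-- B's fold invariant: processing the remaining distinct letters extends the table
theorem pvFoldStep (cs : List Char) (ds₂ : List Char) : ∀ ds₁ : List Char, (ds₁ ++ ds₂).Nodup →
    (ds₂.map (fun a => (cs.count a : Int))).foldl
      (fun g c => (List.range 7).map (fun (k : Nat) =>
        ((List.range (min c ((k : Nat) : Int) + 1).toNat).map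
            (fun (j : Nat) => pyComb k j * g.getD (k - j) 0)).sum))
      ((List.range 7).map (fun k => (pvN ds₁ k (fun a => cs.count a) : Int)))
    = (List.range 7).map (fun k => (pvN (ds₁ ++ ds₂) k (fun a => cs.count a) : Int)) := by
  induction ds₂ with
  | nil =>
    intro ds₁ _
    simp
  | cons d t ih =>
    intro ds₁ h
    rw [List.map_cons, List.foldl_cons]
    have hd : d ∉ ds₁ := by
      rw [List.nodup_append] at h
      intro hmem
      exact h.2.2 d hmem d (by simp) rfl
    have hstep : ((List.range 7).map (fun (k : Nat) =>
        ((List.range (min ((cs.count d : Int)) ((k : Nat) : Int) + 1).toNat).map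
            (fun (j : Nat) => pyComb k j *
              ((List.range 7).map (fun k => (pvN ds₁ k (fun a => cs.count a) : Int))).getD (k - j) 0)).sum))
        = (List.range 7).map (fun k => (pvN (ds₁ ++ [d]) k (fun a => cs.count a) : Int)) := by
      apply List.map_congr_left
      intro k hk
      rw [List.mem_range] at hk
      rw [pvStep ds₁ d k _ hd]
      have h1 : (min ((cs.count d : Int)) ((k : Nat) : Int) + 1).toNat = min (cs.count d) k + 1 := by
        rw [← Nat.cast_min]
        omega
      rw [h1, pvSumRangeInt]
      push_cast
      apply Finset.sum_congr rfl
      intro j hj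
      rw [Finset.mem_range] at hj
      rw [PySem.List.getD_map_range _ 7 _ _ (by omega), pyComb_eq]
    rw [hstep]
    have ht : ((ds₁ ++ [d]) ++ t).Nodup := by
      rw [List.append_assoc, List.singleton_append]
      exact h
    have := ih (ds₁ ++ [d]) ht
    rw [this, List.append_assoc, List.singleton_append]

theorem pvSlice7 (a0 a1 a2 a3 a4 a5 a6 : Int) :
    PySem.List.slice [a0,a1,a2,a3,a4,a5,a6] (some 1) (some 7) = [a1,a2,a3,a4,a5,a6] := rfl

theorem pvA_card (cs : List Char) :
    ((((((pvPk cs 1 ++ pvPk cs 2) ++ pvPk cs 3) ++ pvPk cs 4) ++ pvPk cs 5) ++ pvPk cs 6).foldl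
        (fun t x => t.insert x) (∅ : Std.HashSet String)).size
      = pvN (PySem.Set.ofList cs) 1 (fun a => cs.count a) + pvN (PySem.Set.ofList cs) 2 (fun a => cs.count a)
        + pvN (PySem.Set.ofList cs) 3 (fun a => cs.count a) + pvN (PySem.Set.ofList cs) 4 (fun a => cs.count a)
        + pvN (PySem.Set.ofList cs) 5 (fun a => cs.count a) + pvN (PySem.Set.ofList cs) 6 (fun a => cs.count a) := by
  rw [pvHashCard]
  rw [toFinset_card_append _ _ (by
    intro x hx hx'
    have h6 := pvPk_len hx'
    simp only [List.mem_append] at hx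
    rcases hx with ((((hx|hx)|hx)|hx)|hx) <;> (have := pvPk_len hx; omega))]
  rw [toFinset_card_append _ _ (by
    intro x hx hx'
    have h5 := pvPk_len hx'
    simp only [List.mem_append] at hx
    rcases hx with (((hx|hx)|hx)|hx) <;> (have := pvPk_len hx; omega))]
  rw [toFinset_card_append _ _ (by
    intro x hx hx'
    have h4 := pvPk_len hx'
    simp only [List.mem_append] at hx
    rcases hx with ((hx|hx)|hx) <;> (have := pvPk_len hx; omega))]
  rw [toFinset_card_append _ _ (by
    intro x hx hx'
    have h3 := pvPk_len hx'
    simp only [List.mem_append] at hx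
    rcases hx with (hx|hx) <;> (have := pvPk_len hx; omega))]
  rw [toFinset_card_append _ _ (by
    intro x hx hx'
    have h2 := pvPk_len hx'
    have := pvPk_len hx
    omega)]
  rw [pvPk_card, pvPk_card, pvPk_card, pvPk_card, pvPk_card, pvPk_card]

theorem hitung_kombinasi_username_spec' (nama_lengkap : String) :
    hitung_kombinasi_username nama_lengkap = hitung_kombinasi_username_alt nama_lengkap := by
  simp only [hitung_kombinasi_username, hitung_kombinasi_username_alt]
  rw [show PySem.List.pyRange 1 7 1 = [1, 2, 3, 4, 5, 6] from by decide]
  simp only [List.foldl_cons, List.foldl_nil, List.nil_append, Int.toNat_one,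
    List.map_append]
  rw [PySem.Dict.foldl_insert_getD_add_one_eq_counter]
  set cs := PySem.Chars.lower (PySem.Chars.replace nama_lengkap.toList [' '] []) with hcs
  have hvals : (PySem.Dict.counter cs).values
      = (PySem.Set.ofList cs : List Char).map (fun a => ((cs.count a : Int))) := by
    show ((PySem.Dict.counter cs).items.map Prod.snd) = _
    rw [PySem.Dict.items_counter, List.map_map]
    rfl
  rw [hvals]
  rw [show ([1, 0, 0, 0, 0, 0, 0] : List Int)
      = (List.range 7).map (fun k => (pvN ([] : List Char) k (fun a => cs.count a) : Int)) from rfl]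
  rw [pvFoldStep cs (PySem.Set.ofList cs) [] (by simp [PySem.Set.nodup_ofList cs])]
  simp only [List.nil_append]
  rw [show List.range 7 = [0, 1, 2, 3, 4, 5, 6] from rfl]
  simp only [List.map_cons, List.map_nil]
  rw [pvSlice7]
  simp only [List.sum_cons, List.sum_nil]
  rw [show (List.map (fun x => String.ofList x) (PySem.List.permutations cs 1)) = pvPk cs 1 from rfl,
      show (List.map (fun x => String.ofList x) (PySem.List.permutations cs (Int.toNat 2))) = pvPk cs 2 from rfl,
      show (List.map (fun x => String.ofList x) (PySem.List.permutations cs (Int.toNat 3))) = pvPk cs 3 from rfl,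
      show (List.map (fun x => String.ofList x) (PySem.List.permutations cs (Int.toNat 4))) = pvPk cs 4 from rfl,
      show (List.map (fun x => String.ofList x) (PySem.List.permutations cs (Int.toNat 5))) = pvPk cs 5 from rfl,
      show (List.map (fun x => String.ofList x) (PySem.List.permutations cs (Int.toNat 6))) = pvPk cs 6 from rfl]
  rw [pvA_card]
  push_cast
  ring

-- ===== VERDICT (by name: the statement is the Claim_ definition above) =====
theorem hitung_kombinasi_username_spec : Claim_equal_hitung_kombinasi_username := by
  intro s _
  exact hitung_kombinasi_username_spec' s
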